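-- pv_equiv track=rewrite | github.com/devroacl/Pythonbegginners | EJERCICIO EXAMEN TALLER/funciones.py | clasificar_creditos
-- ===== SOURCE A (Python) =====
-- def clasificar_creditos(creditos):
--     menores_a_100 = {}
--     entre_100_y_150 = {}
--     creditos_mayores_a_150 = {}
--
--     for alumno, credito in creditos.items():
--         if credito < 100:
--             menores_a_100[alumno] = credito
--         elif 100 <= credito <= 150:
--             entre_100_y_150[alumno] = credito
--         else:
--             creditos_mayores_a_150[alumno] = credito
--
--     return {
--         'menores a 100': menores_a_100,
--         'entre 100 y 150': entre_100_y_150,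
--         'creditos mayores a 150': creditos_mayores_a_150
--     }
-- ===== SOURCE B (Python) =====
-- def clasificar_creditos(creditos):
--     return {
--         'menores a 100': {a: c for a, c in creditos.items() if c < 100},
--         'entre 100 y 150': {a: c for a, c in creditos.items() if 100 <= c <= 150},
--         'creditos mayores a 150': {a: c for a, c in creditos.items() if c > 150},
--     }
-- ===== Notes on version B (the rewrite author's own statement) =====
-- stated objective: simpler
-- what changed: Replaces the single mutating partition loop over three accumulator dicts with three independent dict comprehensions, each scanning creditos.items() once with its own range predicate, assembled directly into the returned dict.
import Mathlib
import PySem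

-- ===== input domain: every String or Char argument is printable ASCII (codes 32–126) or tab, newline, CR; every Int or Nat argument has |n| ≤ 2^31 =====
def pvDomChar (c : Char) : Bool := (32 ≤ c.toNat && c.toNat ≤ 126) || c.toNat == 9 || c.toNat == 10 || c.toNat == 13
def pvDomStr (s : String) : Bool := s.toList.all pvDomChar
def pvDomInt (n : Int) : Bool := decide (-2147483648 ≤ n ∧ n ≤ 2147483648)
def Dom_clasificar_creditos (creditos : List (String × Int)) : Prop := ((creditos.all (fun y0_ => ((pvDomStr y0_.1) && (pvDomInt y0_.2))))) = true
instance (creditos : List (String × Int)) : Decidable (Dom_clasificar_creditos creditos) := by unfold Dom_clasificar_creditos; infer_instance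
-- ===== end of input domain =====

-- B replaces A's single three-way partition loop by three independent filter passes (objective: simpler).

-- ===== PORT A =====
-- one loop over creditos.items(), assigning into one of three accumulator dicts
def clasificar_creditos_step
    (st : PySem.Dict String Int × PySem.Dict String Int × PySem.Dict String Int)
    (p : String × Int) :
    PySem.Dict String Int × PySem.Dict String Int × PySem.Dict String Int :=
  if p.2 < 100 then (st.1.insert p.1 p.2, st.2.1, st.2.2)
  else if 100 ≤ p.2 ∧ p.2 ≤ 150 then (st.1, st.2.1.insert p.1 p.2, st.2.2)
  else (st.1, st.2.1, st.2.2.insert p.1 p.2)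

def clasificar_creditos (creditos : List (String × Int)) : List (String × List (String × Int)) :=
  let st := creditos.foldl clasificar_creditos_step (PySem.Dict.empty, PySem.Dict.empty, PySem.Dict.empty)
  [("menores a 100", st.1.items),
   ("entre 100 y 150", st.2.1.items),
   ("creditos mayores a 150", st.2.2.items)]

-- ===== PORT B =====
-- three independent comprehensions, each its own scan of the items
def clasificar_creditos_alt (creditos : List (String × Int)) : List (String × List (String × Int)) :=
  [("menores a 100", creditos.filter (fun p => p.2 < 100)),
   ("entre 100 y 150", creditos.filter (fun p => 100 ≤ p.2 ∧ p.2 ≤ 150)),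
   ("creditos mayores a 150", creditos.filter (fun p => p.2 > 150))]

-- ===== PRECONDITION & SPEC =====
-- Pre_ requires the keys to be pairwise distinct: the Python argument is a dict, so an
-- association list with duplicate keys represents no actual input of A.
def Pre_clasificar_creditos (creditos : List (String × Int)) : Prop :=
  (creditos.map Prod.fst).Nodup

instance (creditos : List (String × Int)) : Decidable (Pre_clasificar_creditos creditos) := by
  unfold Pre_clasificar_creditos; infer_instance

def pvWitness_clasificar_creditos : (List (String × Int)) :=
  [("ana", 50), ("bob", 120), ("carl", 200)]

def Spec_clasificar_creditos (creditos : List (String × Int)) (out : List (String × List (String × Int))) : Prop := out = clasificar_creditos_alt creditos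
instance (creditos : List (String × Int)) (out : List (String × List (String × Int))) : Decidable (Spec_clasificar_creditos creditos out) := by unfold Spec_clasificar_creditos; infer_instance

-- ===== CLAIM (what is proved, stated in full; the proofs are below) =====
def Claim_equal_clasificar_creditos : Prop := ∀ (creditos : List (String × Int)), Dom_clasificar_creditos creditos → Pre_clasificar_creditos creditos → Spec_clasificar_creditos creditos (clasificar_creditos creditos)

-- ===== LEMMAS AND PROOFS =====

-- loop invariant: on fresh distinct keys, each accumulator's items grow by exactly its filter
theorem clasificar_creditos_loop
    (l : List (String × Int)) (d1 d2 d3 : PySem.Dict String Int)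
    (hf : ∀ p ∈ l, d1.contains p.1 = false ∧ d2.contains p.1 = false ∧ d3.contains p.1 = false)
    (hnd : (l.map Prod.fst).Nodup) :
    (l.foldl clasificar_creditos_step (d1, d2, d3)).1.items
        = d1.items ++ l.filter (fun p => p.2 < 100) ∧
    (l.foldl clasificar_creditos_step (d1, d2, d3)).2.1.items
        = d2.items ++ l.filter (fun p => 100 ≤ p.2 ∧ p.2 ≤ 150) ∧
    (l.foldl clasificar_creditos_step (d1, d2, d3)).2.2.items
        = d3.items ++ l.filter (fun p => p.2 > 150) := by
  induction l generalizing d1 d2 d3 with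
  | nil => simp
  | cons p t ih =>
    simp only [List.map_cons, List.nodup_cons, List.mem_map] at hnd
    obtain ⟨hp, hndt⟩ := hnd
    have hph := hf p (by simp)
    have hft : ∀ q ∈ t, q.1 ≠ p.1 := by
      intro q hq hEq
      exact hp ⟨q, hq, hEq⟩
    simp only [List.foldl_cons, List.filter_cons]
    by_cases h1 : p.2 < 100
    · have hstep : clasificar_creditos_step (d1, d2, d3) p = (d1.insert p.1 p.2, d2, d3) := by
        simp [clasificar_creditos_step, h1]
      rw [hstep]
      obtain ⟨e1, e2, e3⟩ := ih (d1.insert p.1 p.2) d2 d3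
        (by
          intro q hq
          refine ⟨?_, (hf q (by simp [hq])).2.1, (hf q (by simp [hq])).2.2⟩
          rw [PySem.Dict.contains_insert]
          simp [hft q hq, (hf q (by simp [hq])).1])
        hndt
      refine ⟨?_, ?_, ?_⟩
      · rw [e1, PySem.Dict.items_insert]
        simp [hph.1, h1]
      · rw [e2]; simp [show ¬(100 ≤ p.2 ∧ p.2 ≤ 150) by omega]
      · rw [e3]; simp [show ¬(p.2 > 150) by omega]
    · by_cases h2 : 100 ≤ p.2 ∧ p.2 ≤ 150
      · have hstep : clasificar_creditos_step (d1, d2, d3) p = (d1, d2.insert p.1 p.2, d3) := by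
          simp [clasificar_creditos_step, h1, h2]
        rw [hstep]
        obtain ⟨e1, e2, e3⟩ := ih d1 (d2.insert p.1 p.2) d3
          (by
            intro q hq
            refine ⟨(hf q (by simp [hq])).1, ?_, (hf q (by simp [hq])).2.2⟩
            rw [PySem.Dict.contains_insert]
            simp [hft q hq, (hf q (by simp [hq])).2.1])
          hndt
        refine ⟨?_, ?_, ?_⟩
        · rw [e1]; simp [h1]
        · rw [e2, PySem.Dict.items_insert]
          simp [hph.2.1, h2]
        · rw [e3]; simp [show ¬(p.2 > 150) by omega]
      · have hstep : clasificar_creditos_step (d1, d2, d3) p = (d1, d2, d3.insert p.1 p.2) := by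
          simp [clasificar_creditos_step, h1, h2]
        rw [hstep]
        obtain ⟨e1, e2, e3⟩ := ih d1 d2 (d3.insert p.1 p.2)
          (by
            intro q hq
            refine ⟨(hf q (by simp [hq])).1, (hf q (by simp [hq])).2.1, ?_⟩
            rw [PySem.Dict.contains_insert]
            simp [hft q hq, (hf q (by simp [hq])).2.2])
          hndt
        refine ⟨?_, ?_, ?_⟩
        · rw [e1]; simp [h1]
        · rw [e2]; simp [h2]
        · rw [e3, PySem.Dict.items_insert]
          simp [hph.2.2, show p.2 > 150 by omega]

-- ===== VERDICT (by name: the statement is the Claim_ definition above) =====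
theorem clasificar_creditos_spec : Claim_equal_clasificar_creditos := by
  intro creditos _ hpre
  unfold Spec_clasificar_creditos clasificar_creditos clasificar_creditos_alt
  obtain ⟨e1, e2, e3⟩ := clasificar_creditos_loop creditos
    PySem.Dict.empty PySem.Dict.empty PySem.Dict.empty
    (by intro p _; simp [PySem.Dict.contains_empty]) hpre
  simp only [e1, e2, e3]
  simp [PySem.Dict.empty]
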